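-- pv_equiv track=rewrite | github.com/KaikoClanworth1/igb-blender | igz_format/igz_reader.py | _decode_nibbles
-- ===== SOURCE A (Python) =====
-- def _decode_nibbles(data, offset, count, add_one=True):
--     """Decode a delta-encoded nibble stream into a sorted list of offsets.
--
--     Each nibble (4 bits) has:
--       - Bit 3 (0x8): continuation flag (1=continue, 0=complete this value)
--       - Bits 0-2 (0x7): 3 data bits
--
--     Values accumulate via shifting, then:
--       - v6: result = previous + (value + 1) * 4  (add_one=True)
--       - v10: result = previous + value * 4        (add_one=False)
--     """
--     result = []
--     pos = offset
--     current_value = 0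
--     current_shift = 0
--
--     while len(result) < count:
--         if pos >= len(data):
--             break
--         byte = data[pos]
--         pos += 1
--
--         for nibble_idx in range(2):
--             nibble = (byte >> (nibble_idx * 4)) & 0xF
--             data_bits = nibble & 0x7
--             continuation = nibble & 0x8
--
--             current_value |= (data_bits << current_shift)
--             current_shift += 3
--
--             if continuation == 0:
--                 last = result[-1] if result else 0
--                 if add_one:
--                     result.append(last + (current_value + 1) * 4)
--                 else:
--                     result.append(last + current_value * 4)
--
--                 if len(result) >= count:
--                     break
--
--                 current_value = 0
--                 current_shift = 0
--
--     return result
-- ===== SOURCE B (Python) =====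
-- def _decode_nibbles(data, offset, count, add_one=True):
--     """Three-pass pipeline: flatten bytes to nibbles, group nibbles into
--     completed values, then prefix-sum the deltas (truncated to count)."""
--     if count <= 0:
--         return []
--
--     # Pass 1: the nibble stream (low nibble first), walking from `offset`.
--     nibbles = []
--     pos = offset
--     while pos < len(data):
--         byte = data[pos]
--         pos += 1
--         nibbles.append(byte & 0xF)
--         nibbles.append((byte >> 4) & 0xF)
--
--     # Pass 2: group nibbles into completed values (trailing partial dropped).
--     values = []
--     value = 0
--     shift = 0
--     for nib in nibbles:
--         value |= (nib & 0x7) << shift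
--         shift += 3
--         if not (nib & 0x8):
--             values.append(value)
--             value = 0
--             shift = 0
--
--     # Pass 3: prefix sums of the deltas, truncated to count.
--     result = []
--     total = 0
--     for v in values[:count]:
--         total += (v + 1) * 4 if add_one else v * 4
--         result.append(total)
--     return result
-- ===== Notes on version B (the rewrite author's own statement) =====
-- stated objective: alternative
-- what changed: A's single fused while-loop (interleaving byte fetch, nibble decode, and appending with result[-1]) is replaced by a three-pass pipeline: flatten bytes to a nibble list, group nibbles into completed values, then prefix-sum the deltas truncated to count.
import Mathlib
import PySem

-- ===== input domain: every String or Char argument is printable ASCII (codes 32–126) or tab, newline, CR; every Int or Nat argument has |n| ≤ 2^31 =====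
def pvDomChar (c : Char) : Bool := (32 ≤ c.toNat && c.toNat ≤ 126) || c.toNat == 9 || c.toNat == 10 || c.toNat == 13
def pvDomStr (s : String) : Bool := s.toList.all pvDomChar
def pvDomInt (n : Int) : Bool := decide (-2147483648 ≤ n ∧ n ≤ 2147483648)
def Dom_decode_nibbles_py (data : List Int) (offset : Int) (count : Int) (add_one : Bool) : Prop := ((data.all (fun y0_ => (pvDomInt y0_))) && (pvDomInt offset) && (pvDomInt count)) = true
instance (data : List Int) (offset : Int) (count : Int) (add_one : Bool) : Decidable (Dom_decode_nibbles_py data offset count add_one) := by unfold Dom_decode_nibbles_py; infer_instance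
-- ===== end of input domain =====

-- B replaces A's fused while-loop (interleaved nibble decoding and appending) by a three-pass
-- pipeline — flatten to nibbles, group into values, prefix-sum the deltas; objective: alternative
-- decomposition, no speed claim.

-- ===== PORT A =====
-- One iteration of A's inner `for nibble_idx in range(2)` body.
-- Returns the new (result, current_value, current_shift) and the `break` flag
-- (len(result) >= count reached).  current_shift is kept as a Nat because Python
-- only ever shifts by the nonnegative 0,3,6,… here.
def pvNibStepA (count : Int) (add_one : Bool) (byte : Int) (nibble_idx : Nat)
    (result : List Int) (cv : Int) (cs : Nat) : (List Int × Int × Nat) × Bool :=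
  let nibble := PySem.Int.band (byte >>> (nibble_idx * 4)) 15
  let data_bits := PySem.Int.band nibble 7
  let continuation := PySem.Int.band nibble 8
  let cv' := PySem.Int.bor cv (data_bits <<< cs)
  let cs' := cs + 3
  if continuation = 0 then
    let last := result.getLastD 0
    let x := if add_one then last + (cv' + 1) * 4 else last + cv' * 4
    let result' := result ++ [x]
    if count ≤ (result'.length : Int) then ((result', cv', cs'), true)
    else ((result', 0, 0), false)
  else ((result, cv', cs'), false)

-- A's `while` loop.  The fuel is exactly the number of iterations the Python loop
-- can still make before `pos >= len(data)` (the loop advances pos by 1 each turn),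
-- so fuel = 0 is precisely Python's `pos >= len(data): break`.  `pyGet? = none`
-- (pos < -len(data)) is where Python raises IndexError — excluded by Pre_.
def pvLoopA (data : List Int) (count : Int) (add_one : Bool) :
    Nat → List Int → Int → Int → Nat → List Int
  | 0, result, _, _, _ => result
  | fuel+1, result, pos, cv, cs =>
    if (result.length : Int) < count then
      match PySem.List.pyGet? data pos with
      | none => result
      | some byte =>
        let s1 := pvNibStepA count add_one byte 0 result cv cs
        if s1.2 then s1.1.1
        else
          let s2 := pvNibStepA count add_one byte 1 s1.1.1 s1.1.2.1 s1.1.2.2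
          -- a `break` after the second nibble is subsumed by the re-checked while guard
          pvLoopA data count add_one fuel s2.1.1 (pos+1) s2.1.2.1 s2.1.2.2
    else result

def decode_nibbles_py (data : List Int) (offset : Int) (count : Int) (add_one : Bool) : List Int :=
  pvLoopA data count add_one ((data.length : Int) - offset).toNat [] offset 0 0

-- ===== PORT B =====
-- Pass 1: the nibble stream from `offset` (low nibble first).  Fuel as in port A.
def pvNibblesB (data : List Int) : Nat → Int → List Int
  | 0, _ => []
  | fuel+1, pos =>
    match PySem.List.pyGet? data pos with
    | none => []  -- Python raises IndexError here (pos < -len(data)); outside Pre_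
    | some byte =>
      PySem.Int.band byte 15 :: PySem.Int.band (byte >>> (4:Nat)) 15 :: pvNibblesB data fuel (pos+1)

-- Pass 2: group nibbles into completed values (trailing partial dropped).
def pvGroupB : List Int → Int → Nat → List Int
  | [], _, _ => []
  | nib :: rest, value, shift =>
    let value' := PySem.Int.bor value (PySem.Int.band nib 7 <<< shift)
    if PySem.Int.band nib 8 = 0 then value' :: pvGroupB rest 0 0
    else pvGroupB rest value' (shift + 3)

-- Pass 3: prefix sums of the deltas.
def pvSumsB (add_one : Bool) : List Int → Int → List Int
  | [], _ => []
  | v :: rest, total =>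
    let total' := total + (if add_one then (v + 1) * 4 else v * 4)
    total' :: pvSumsB add_one rest total'

def decode_nibbles_py_alt (data : List Int) (offset : Int) (count : Int) (add_one : Bool) : List Int :=
  if count ≤ 0 then []
  else
    let nibbles := pvNibblesB data ((data.length : Int) - offset).toNat offset
    let values := pvGroupB nibbles 0 0
    pvSumsB add_one (values.take count.toNat) 0

-- ===== PRECONDITION & SPEC =====
-- Pre_ excludes exactly the inputs on which the Python A raises IndexError:
-- count > 0 together with offset < -len(data) (the first data[pos] is out of range).
def Pre_decode_nibbles_py (data : List Int) (offset : Int) (count : Int) (add_one : Bool) : Prop :=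
  count ≤ 0 ∨ -(data.length : Int) ≤ offset
instance (data : List Int) (offset : Int) (count : Int) (add_one : Bool) : Decidable (Pre_decode_nibbles_py data offset count add_one) := by unfold Pre_decode_nibbles_py; infer_instance

def pvWitness_decode_nibbles_py : List Int × Int × Int × Bool := ([33, 4], 0, 3, true)

def Spec_decode_nibbles_py (data : List Int) (offset : Int) (count : Int) (add_one : Bool) (out : List Int) : Prop := out = decode_nibbles_py_alt data offset count add_one
instance (data : List Int) (offset : Int) (count : Int) (add_one : Bool) (out : List Int) : Decidable (Spec_decode_nibbles_py data offset count add_one out) := by unfold Spec_decode_nibbles_py; infer_instance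

-- ===== CLAIM (what is proved, stated in full; the proofs are below) =====
def Claim_equal_decode_nibbles_py : Prop := ∀ (data : List Int) (offset : Int) (count : Int) (add_one : Bool), Dom_decode_nibbles_py data offset count add_one → Pre_decode_nibbles_py data offset count add_one → Spec_decode_nibbles_py data offset count add_one (decode_nibbles_py data offset count add_one)

-- ===== LEMMAS AND PROOFS =====

theorem pvDelta_push (add_one : Bool) (last v : Int) :
    (if add_one then last + (v + 1) * 4 else last + v * 4)
      = last + (if add_one then (v + 1) * 4 else v * 4) := by
  cases add_one <;> simp

-- The loop invariant: A's fused loop, from any state, appends exactly what B's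
-- pipeline produces from the remaining nibble stream.
theorem pvLoopA_eq (data : List Int) (count : Int) (add_one : Bool) :
    ∀ (fuel : Nat) (pos : Int) (result : List Int) (cv : Int) (cs : Nat),
      pvLoopA data count add_one fuel result pos cv cs
        = result ++ pvSumsB add_one
            ((pvGroupB (pvNibblesB data fuel pos) cv cs).take (count - result.length).toNat)
            (result.getLastD 0) := by
  intro fuel
  induction fuel with
  | zero => intro pos result cv cs; simp [pvLoopA, pvNibblesB, pvGroupB, pvSumsB]
  | succ f ih =>
    intro pos result cv cs
    by_cases hlt : (result.length : Int) < count
    · rcases hget : PySem.List.pyGet? data pos with _ | byte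
      · simp [pvLoopA, pvNibblesB, hlt, hget, pvGroupB, pvSumsB]
      · -- the byte contributes nibbles n0 (low) and n1 (high)
        have hcons : pvNibblesB data (f+1) pos
            = PySem.Int.band byte 15 :: PySem.Int.band (byte >>> (4:Nat)) 15
              :: pvNibblesB data f (pos+1) := by
          simp [pvNibblesB, hget]
        rw [hcons]
        by_cases hc0 : PySem.Int.band (PySem.Int.band byte 15) 8 = 0
        · by_cases hbrk : count ≤ (result.length : Int) + 1
          · have htk : (count - (result.length : Int)).toNat = 1 := by omega
            have htk0 : (count - ((result.length : Int) + 1)).toNat = 0 := by omega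
            simp [pvLoopA, pvNibStepA, hget, hlt, hc0, hbrk, htk,
                  pvGroupB, pvSumsB, pvDelta_push]
          · by_cases hc1 : PySem.Int.band (PySem.Int.band (byte >>> (4:Nat)) 15) 8 = 0
            · by_cases hbrk2 : count ≤ (result.length : Int) + 2
              · have htk : (count - (result.length : Int)).toNat = 2 := by omega
                have htk2 : (count - ((result.length : Int) + 2)).toNat = 0 := by omega
                simp [pvLoopA, pvNibStepA, hget, hlt, hc0, hbrk, hc1, hbrk2, htk, htk2,
                      pvGroupB, pvSumsB, pvDelta_push, ih]
              · have htk : (count - (result.length : Int)).toNat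
                    = (count - ((result.length : Int) + 2)).toNat + 2 := by omega
                simp [pvLoopA, pvNibStepA, hget, hlt, hc0, hbrk, hc1, hbrk2, htk,
                      pvGroupB, pvSumsB, pvDelta_push, ih]
            · have htk : (count - (result.length : Int)).toNat
                  = (count - ((result.length : Int) + 1)).toNat + 1 := by omega
              simp [pvLoopA, pvNibStepA, hget, hlt, hc0, hbrk, hc1, htk,
                    pvGroupB, pvSumsB, pvDelta_push, ih]
        · by_cases hc1 : PySem.Int.band (PySem.Int.band (byte >>> (4:Nat)) 15) 8 = 0
          · by_cases hbrk : count ≤ (result.length : Int) + 1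
            · have htk : (count - (result.length : Int)).toNat = 1 := by omega
              have htk0 : (count - ((result.length : Int) + 1)).toNat = 0 := by omega
              simp [pvLoopA, pvNibStepA, hget, hlt, hc0, hc1, hbrk, htk, htk0,
                    pvGroupB, pvSumsB, pvDelta_push, ih]
            · have htk : (count - (result.length : Int)).toNat
                  = (count - ((result.length : Int) + 1)).toNat + 1 := by omega
              simp [pvLoopA, pvNibStepA, hget, hlt, hc0, hc1, hbrk, htk,
                    pvGroupB, pvSumsB, pvDelta_push, ih]
          · simp [pvLoopA, pvNibStepA, hget, hlt, hc0, hc1, pvGroupB, ih]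
    · have h0 : (count - (result.length : Int)).toNat = 0 := by omega
      simp [pvLoopA, hlt, h0, pvSumsB]

-- ===== VERDICT (by name: the statement is the Claim_ definition above) =====
theorem decode_nibbles_py_spec : Claim_equal_decode_nibbles_py := by
  intro data offset count add_one _ _
  unfold Spec_decode_nibbles_py decode_nibbles_py decode_nibbles_py_alt
  rw [pvLoopA_eq]
  by_cases hc : count ≤ 0
  · have h0 : count.toNat = 0 := by omega
    simp [hc, h0, pvSumsB]
  · simp [hc]
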